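-- pv_equiv track=rewrite | github.com/ariuk44/retake_exam_prep | day_22.py | isSystematicallyIncreasing
-- ===== SOURCE A (Python) =====
-- def isSystematicallyIncreasing(arr):
--     i = 0
--     expected_max = 1
--     while i < len(arr):
--         for value in range(1, expected_max + 1):
--             if i >= len(arr) or arr[i] != value:
--                 return 0
--             i += 1
--         expected_max += 1
--     return 1
-- ===== SOURCE B (Python) =====
-- def isSystematicallyIncreasing(arr):
--     n = len(arr)
--     expected = []
--     m = 1
--     while len(expected) < n:
--         expected.extend(range(1, m + 1))
--         m += 1
--     return 1 if list(arr) == expected else 0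
-- ===== Notes on version B (the rewrite author's own statement) =====
-- stated objective: simpler
-- what changed: B builds the full expected reference sequence (complete blocks 1..m appended until it is at least as long as arr) and returns the result of one whole-list equality comparison, replacing A's interleaved two-level loop with per-element early-exit checks.
import Mathlib
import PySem

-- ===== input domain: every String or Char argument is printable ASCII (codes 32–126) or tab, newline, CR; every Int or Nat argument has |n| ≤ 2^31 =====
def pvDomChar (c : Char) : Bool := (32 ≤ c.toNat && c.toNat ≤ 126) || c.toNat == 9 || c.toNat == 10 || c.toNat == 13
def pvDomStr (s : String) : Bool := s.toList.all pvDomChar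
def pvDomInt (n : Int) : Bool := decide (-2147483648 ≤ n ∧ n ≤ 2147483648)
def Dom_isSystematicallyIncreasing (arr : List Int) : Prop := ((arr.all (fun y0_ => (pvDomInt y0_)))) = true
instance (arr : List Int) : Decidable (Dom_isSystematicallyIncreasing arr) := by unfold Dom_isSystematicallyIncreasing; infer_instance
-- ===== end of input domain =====

-- B builds the complete expected reference sequence once and does a single whole-list
-- equality comparison, instead of A's two-level loop with per-element early exit (objective: simpler).

-- ===== PORT A =====
-- inner 'for value in range(1, expected_max+1)' loop of A: k values left to check,
-- current expected value v, cursor i; 'none' = the Python 'return 0', 'some i' = fell through.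
def pvInnerA (arr : List Int) (i : Nat) (v : Int) (k : Nat) : Option Nat :=
  match k with
  | 0 => some i
  | k + 1 =>
    if h : i < arr.length then
      if arr[i] = v then pvInnerA arr (i + 1) (v + 1) k else none
    else none

-- If the inner loop falls through, the cursor advanced by exactly k (needed for termination of pvGoA).
theorem pvInnerA_some_len {arr : List Int} {i i' : Nat} {v : Int} {k : Nat}
    (h : pvInnerA arr i v k = some i') : i' = i + k := by
  induction k generalizing i v with
  | zero => simp [pvInnerA] at h; omega
  | succ k ih =>
    simp only [pvInnerA] at h
    split at h
    · split at h
      · have := ih h; omega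
      · exact absurd h (by simp)
    · exact absurd h (by simp)

-- outer 'while i < len(arr)' loop of A; em1 + 1 is Python's expected_max (which is always ≥ 1).
def pvGoA (arr : List Int) (i : Nat) (em1 : Nat) : Int :=
  if i < arr.length then
    match h : pvInnerA arr i 1 (em1 + 1) with
    | none => 0
    | some i' => pvGoA arr i' (em1 + 1)
  else 1
termination_by arr.length - i
decreasing_by
  have := pvInnerA_some_len h
  omega

def isSystematicallyIncreasing (arr : List Int) : Int := pvGoA arr 0 0

-- ===== PORT B =====
-- list(range(1, m+1)) for m = m1 + 1
def pvBlock (m1 : Nat) : List Int := (List.range (m1 + 1)).map (fun j : Nat => (1 : Int) + (j : Int))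

-- the 'while len(expected) < n' loop of B, accumulating 'expected'
def pvBuildB (n : Nat) (m1 : Nat) (acc : List Int) : List Int :=
  if acc.length < n then pvBuildB n (m1 + 1) (acc ++ pvBlock m1) else acc
termination_by n - acc.length
decreasing_by
  simp [pvBlock]
  omega

def isSystematicallyIncreasing_alt (arr : List Int) : Int :=
  if arr = pvBuildB arr.length 0 [] then 1 else 0

-- ===== PRECONDITION & SPEC =====
def Spec_isSystematicallyIncreasing (arr : List Int) (out : Int) : Prop := out = isSystematicallyIncreasing_alt arr
instance (arr : List Int) (out : Int) : Decidable (Spec_isSystematicallyIncreasing arr out) := by unfold Spec_isSystematicallyIncreasing; infer_instance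

-- ===== CLAIM (what is proved, stated in full; the proofs are below) =====
def Claim_equal_isSystematicallyIncreasing : Prop := ∀ (arr : List Int), Dom_isSystematicallyIncreasing arr → Spec_isSystematicallyIncreasing arr (isSystematicallyIncreasing arr)

-- ===== LEMMAS AND PROOFS =====

-- accumulator-free form of B's builder
def pvBPure (n : Nat) (m1 : Nat) : List Int :=
  if 0 < n then pvBlock m1 ++ pvBPure (n - (m1 + 1)) (m1 + 1) else []
termination_by n
decreasing_by omega

theorem pvBlock_length (m1 : Nat) : (pvBlock m1).length = m1 + 1 := by
  simp [pvBlock]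

theorem pvBuildB_eq (n m1 : Nat) (acc : List Int) :
    pvBuildB n m1 acc = acc ++ pvBPure (n - acc.length) m1 := by
  induction m1, acc using pvBuildB.induct (n := n) with
  | case1 m1 acc hlt ih =>
    rw [pvBuildB, if_pos hlt, ih]
    conv_rhs => rw [pvBPure]
    rw [if_pos (show 0 < n - acc.length by omega)]
    have hidx : n - (acc ++ pvBlock m1).length = n - acc.length - (m1 + 1) := by
      rw [List.length_append, pvBlock_length]; omega
    rw [hidx, List.append_assoc]
  | case2 m1 acc hge =>
    rw [pvBuildB, if_neg hge, pvBPure, if_neg (by omega)]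
    simp

-- a block starting at value v
def pvBlockFrom (v : Int) (k : Nat) : List Int := (List.range k).map (fun j : Nat => v + (j : Int))

theorem pvBlock_eq_blockFrom (m1 : Nat) : pvBlock m1 = pvBlockFrom 1 (m1 + 1) := rfl

theorem pvBlockFrom_succ (v : Int) (k : Nat) :
    pvBlockFrom v (k + 1) = v :: pvBlockFrom (v + 1) k := by
  unfold pvBlockFrom
  rw [List.range_succ_eq_map, List.map_cons, List.map_map]
  norm_num
  intro a _
  ring

-- the inner loop succeeds when the block lies at the cursor …
theorem pvInnerA_of_prefix {arr rest : List Int} {v : Int} {k i : Nat}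
    (h : arr.drop i = pvBlockFrom v k ++ rest) : pvInnerA arr i v k = some (i + k) := by
  induction k generalizing i v rest with
  | zero => simp [pvInnerA]
  | succ k ih =>
    rw [pvBlockFrom_succ, List.cons_append] at h
    have hlt : i < arr.length := by
      by_contra hge
      rw [List.drop_eq_nil_of_le (by omega)] at h
      simp at h
    obtain ⟨hhead, htail⟩ := List.cons.inj ((List.getElem_cons_drop hlt).trans h)
    simp only [pvInnerA]
    rw [dif_pos hlt, if_pos hhead, ih htail]
    congr 1
    omega

-- … and exactly then: on success the block is what the cursor passed over
theorem pvInnerA_some_prefix {arr : List Int} {v : Int} {k i i' : Nat}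
    (h : pvInnerA arr i v k = some i') :
    i' = i + k ∧ arr.drop i = pvBlockFrom v k ++ arr.drop (i + k) := by
  induction k generalizing i v with
  | zero => simp [pvInnerA] at h; simp [pvBlockFrom, h]
  | succ k ih =>
    simp only [pvInnerA] at h
    split at h
    · rename_i hlt
      split at h
      · rename_i hv
        obtain ⟨h1, h2⟩ := ih h
        have hk : i + 1 + k = i + (k + 1) := by omega
        refine ⟨by omega, ?_⟩
        rw [pvBlockFrom_succ, ← List.getElem_cons_drop hlt, hv, h2, hk, List.cons_append]
      · exact absurd h (by simp)
    · exact absurd h (by simp)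

-- main invariant: A's outer loop from cursor i with expected_max = em1 + 1 returns 1
-- exactly when the rest of arr equals the reference sequence built from block em1 on
theorem pvGoA_eq (arr : List Int) (i em1 : Nat) :
    pvGoA arr i em1 = if arr.drop i = pvBPure (arr.length - i) em1 then 1 else 0 := by
  induction i, em1 using pvGoA.induct (arr := arr) with
  | case1 i em1 hlt hnone =>
    rw [pvGoA, if_pos hlt]
    split
    · rw [if_neg]
      intro hcontra
      rw [pvBPure, if_pos (by omega), pvBlock_eq_blockFrom] at hcontra
      rw [pvInnerA_of_prefix hcontra] at hnone
      simp at hnone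
    · rename_i i' heq
      rw [heq] at hnone
      simp at hnone
  | case2 i em1 hlt i' hsome ih =>
    obtain ⟨hi', hpre⟩ := pvInnerA_some_prefix hsome
    subst hi'
    rw [pvGoA, if_pos hlt]
    split
    · rename_i heq
      rw [heq] at hsome
      simp at hsome
    · rename_i j heq
      rw [heq] at hsome
      obtain rfl : j = i + (em1 + 1) := Option.some.inj hsome
      rw [ih, hpre]
      conv_rhs => rw [pvBPure]
      rw [if_pos (show 0 < arr.length - i by omega), pvBlock_eq_blockFrom]
      have harith : arr.length - (i + (em1 + 1)) = arr.length - i - (em1 + 1) := by omega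
      rw [harith]
      simp
  | case3 i em1 hge =>
    rw [pvGoA, if_neg hge, if_pos]
    rw [List.drop_eq_nil_of_le (by omega), pvBPure, if_neg (by omega)]

-- ===== VERDICT (by name: the statement is the Claim_ definition above) =====
theorem isSystematicallyIncreasing_spec : Claim_equal_isSystematicallyIncreasing := by
  intro arr _
  unfold Spec_isSystematicallyIncreasing isSystematicallyIncreasing isSystematicallyIncreasing_alt
  rw [pvGoA_eq, pvBuildB_eq]
  simp
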